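-- pv_equiv track=rewrite | github.com/yungpunk2001/LPRO_SIRA | DataSet Camilo y Daniela/Clasificadores Tradicionales/clasif_trad_utils.py | resolve_probability_index
-- ===== SOURCE A (Python) =====
-- from typing import Iterable, Sequence
--
-- def resolve_probability_index(classes: Iterable, positive_target) -> int:
--     classes_list = list(classes)
--     if positive_target in classes_list:
--         return classes_list.index(positive_target)
--
--     normalized_lookup = {
--         str(class_value).lower(): index
--         for index, class_value in enumerate(classes_list)
--     }
--     normalized_target = str(positive_target).lower()
--     if normalized_target in normalized_lookup:
--         return normalized_lookup[normalized_target]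
--
--     raise ValueError(
--         f"La clase positiva {positive_target!r} no aparece en classes_={classes_list!r}."
--     )
-- ===== SOURCE B (Python) =====
-- def resolve_probability_index(classes, positive_target):
--     classes_list = list(classes)
--     normalized_target = str(positive_target).lower()
--     norm_idx = None
--     for index, class_value in enumerate(classes_list):
--         if class_value == positive_target:
--             return index
--         if str(class_value).lower() == normalized_target:
--             norm_idx = index
--     if norm_idx is not None:
--         return norm_idx
--     raise ValueError(
--         f"La clase positiva {positive_target!r} no aparece en classes_={classes_list!r}."
--     )
-- ===== Notes on version B (the rewrite author's own statement) =====
-- stated objective: faster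
-- what changed: Replaces A's membership test + .index scan + full dict comprehension + dict lookup with a single pass that returns the first exact match immediately and records the last case-insensitive match.
import Mathlib
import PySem

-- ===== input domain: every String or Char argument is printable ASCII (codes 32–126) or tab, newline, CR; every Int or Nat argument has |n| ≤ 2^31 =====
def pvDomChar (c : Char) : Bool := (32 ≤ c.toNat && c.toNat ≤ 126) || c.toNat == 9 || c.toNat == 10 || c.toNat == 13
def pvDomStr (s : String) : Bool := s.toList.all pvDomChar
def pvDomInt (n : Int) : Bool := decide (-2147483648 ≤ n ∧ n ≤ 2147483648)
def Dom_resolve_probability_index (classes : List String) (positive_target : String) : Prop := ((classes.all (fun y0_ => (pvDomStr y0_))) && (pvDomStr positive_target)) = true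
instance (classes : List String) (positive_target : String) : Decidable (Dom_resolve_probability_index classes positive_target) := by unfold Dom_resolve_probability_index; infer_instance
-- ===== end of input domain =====

-- B merges A's three scans (membership test, .index, dict comprehension + lookup) into one
-- early-exiting pass; the proved equivalence covers the return value on inputs where A returns.

-- ===== PORT A =====
def resolve_probability_index (classes : List String) (positive_target : String) : Int :=
  if positive_target ∈ classes then
    ((PySem.List.index? classes positive_target).getD 0 : Nat)
  else
    let normalized_lookup : PySem.Dict String Int :=
      (PySem.List.enumerate classes).foldl
        (fun d p => d.insert (PySem.Str.lower p.2) p.1) PySem.Dict.empty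
    let normalized_target := PySem.Str.lower positive_target
    if normalized_lookup.contains normalized_target then
      normalized_lookup.getD normalized_target 0
    else
      0  -- Python raises ValueError here; excluded by Pre_

-- ===== PORT B =====
def rpiLoop (pt ptl : String) (best : Option Int) : List (Int × String) → Int
  | [] => best.getD 0  -- Python raises ValueError here; excluded by Pre_
  | (i, c) :: rest =>
    if c = pt then i
    else rpiLoop pt ptl (if PySem.Str.lower c = ptl then some i else best) rest

def resolve_probability_index_alt (classes : List String) (positive_target : String) : Int :=
  rpiLoop positive_target (PySem.Str.lower positive_target) none
    (PySem.List.enumerate classes)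

-- ===== PRECONDITION & SPEC =====
-- Pre_ excludes exactly the inputs where A raises ValueError: positive_target occurs in
-- classes neither exactly nor case-insensitively (B raises the identical ValueError there).
def Pre_resolve_probability_index (classes : List String) (positive_target : String) : Prop :=
  positive_target ∈ classes ∨
    PySem.Str.lower positive_target ∈ classes.map PySem.Str.lower
instance (classes : List String) (positive_target : String) : Decidable (Pre_resolve_probability_index classes positive_target) := by unfold Pre_resolve_probability_index; infer_instance

def pvWitness_resolve_probability_index : List String × String := (["No", "Yes"], "yes")

def Spec_resolve_probability_index (classes : List String) (positive_target : String) (out : Int) : Prop := out = resolve_probability_index_alt classes positive_target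
instance (classes : List String) (positive_target : String) (out : Int) : Decidable (Spec_resolve_probability_index classes positive_target out) := by unfold Spec_resolve_probability_index; infer_instance

-- ===== CLAIM (what is proved, stated in full; the proofs are below) =====
def Claim_equal_resolve_probability_index : Prop := ∀ (classes : List String) (positive_target : String), Dom_resolve_probability_index classes positive_target → Pre_resolve_probability_index classes positive_target → Spec_resolve_probability_index classes positive_target (resolve_probability_index classes positive_target)

-- ===== LEMMAS AND PROOFS =====

-- index (counted from s) of the LAST element of the list whose lowercase equals ptl
def lastNorm (ptl : String) : List String → Int → Option Int
  | [], _ => none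
  | x :: xs, s =>
    (lastNorm ptl xs (s + 1)).orElse
      (fun _ => if PySem.Str.lower x = ptl then some s else none)

theorem rpiLoop_no_exact (pt ptl : String) (xs : List String) (h : pt ∉ xs) :
    ∀ (s : Int) (best : Option Int),
      rpiLoop pt ptl best (PySem.List.enumerate xs s) =
        ((lastNorm ptl xs s).orElse (fun _ => best)).getD 0 := by
  induction xs with
  | nil => intro s best; simp [PySem.List.enumerate_nil, rpiLoop, lastNorm]
  | cons x xs ih =>
    intro s best
    have hx : x ≠ pt := fun e => h (e ▸ List.mem_cons_self)
    have hxs : pt ∉ xs := fun e => h (List.mem_cons_of_mem _ e)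
    rw [PySem.List.enumerate_cons]
    simp only [rpiLoop, hx, if_false]
    rw [ih hxs (s + 1)]
    simp only [lastNorm]
    cases lastNorm ptl xs (s + 1) with
    | some i => simp [Option.orElse]
    | none =>
      by_cases hlow : PySem.Str.lower x = ptl <;> simp [hlow, Option.orElse]

theorem rpiLoop_exact (pt ptl : String) (xs : List String) (h : pt ∈ xs) :
    ∀ (s : Int) (best : Option Int),
      rpiLoop pt ptl best (PySem.List.enumerate xs s) =
        s + ((PySem.List.index? xs pt).getD 0 : Nat) := by
  induction xs with
  | nil => cases h
  | cons x xs ih =>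
    intro s best
    rw [PySem.List.enumerate_cons]
    by_cases hx : x = pt
    · subst hx
      rw [PySem.List.index?_cons_self]
      simp [rpiLoop]
    · have hxs : pt ∈ xs := (List.mem_cons.mp h).resolve_left (fun e => hx e.symm)
      obtain ⟨k, hk⟩ := Option.isSome_iff_exists.mp
        ((PySem.List.index?_isSome_iff xs pt).mpr hxs)
      simp only [rpiLoop, hx, if_false]
      rw [ih hxs (s + 1)]
      rw [PySem.List.index?_cons_of_ne _ hx, hk]
      simp only [Option.map_some, Option.getD_some]
      push_cast
      ring

theorem dict_foldl_get (ptl : String) (xs : List String) :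
    ∀ (s : Int) (d : PySem.Dict String Int),
      ((PySem.List.enumerate xs s).foldl
          (fun d p => d.insert (PySem.Str.lower p.2) p.1) d).get? ptl =
        (lastNorm ptl xs s).orElse (fun _ => d.get? ptl) := by
  induction xs with
  | nil => intro s d; simp [PySem.List.enumerate_nil, lastNorm]
  | cons x xs ih =>
    intro s d
    rw [PySem.List.enumerate_cons]
    simp only [List.foldl_cons]
    rw [ih (s + 1)]
    simp only [lastNorm]
    cases lastNorm ptl xs (s + 1) with
    | some i => simp [Option.orElse]
    | none =>
      by_cases hlow : PySem.Str.lower x = ptl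
      · subst hlow
        simp [Option.orElse, PySem.Dict.get?_insert_self]
      · have hne : ptl ≠ PySem.Str.lower x := fun e => hlow e.symm
        simp [Option.orElse, hlow, PySem.Dict.get?_insert_of_ne _ _ hne]

-- ===== VERDICT (by name: the statement is the Claim_ definition above) =====
theorem resolve_probability_index_spec : Claim_equal_resolve_probability_index := by
  intro classes pt _ _
  unfold Spec_resolve_probability_index resolve_probability_index resolve_probability_index_alt
  by_cases hmem : pt ∈ classes
  · rw [if_pos hmem, rpiLoop_exact pt _ classes hmem 0 none, zero_add]
  · rw [if_neg hmem]
    rw [rpiLoop_no_exact pt _ classes hmem 0 none]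
    have hg := dict_foldl_get (PySem.Str.lower pt) classes 0 PySem.Dict.empty
    simp only [PySem.Dict.get?_empty] at hg
    simp only [PySem.Dict.getD_eq_get?_getD, PySem.Dict.contains_eq_isSome_get?, hg]
    cases lastNorm (PySem.Str.lower pt) classes 0 with
    | some i => simp [Option.orElse]
    | none => simp [Option.orElse]
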